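-- pv_equiv track=rewrite | github.com/conspol/dash_decision_vis | dash_decision_vis/utils.py | group_by_key_length
-- ===== SOURCE A (Python) =====
-- def group_by_key_length(input_dict):
--     grouped_dict = {}
--     for key, value in input_dict.items():
--         parts_count = key.count('-') + 1
--
--         if parts_count not in grouped_dict:
--             grouped_dict[parts_count] = []
--
--         grouped_dict[parts_count].append(value)
--
--     return grouped_dict
-- ===== SOURCE B (Python) =====
-- def group_by_key_length(input_dict):
--     pairs = [(key.count('-') + 1, value) for key, value in input_dict.items()]
--     counts = list(dict.fromkeys(c for c, _ in pairs))
--     return {c: [v for c2, v in pairs if c2 == c] for c in counts}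
-- ===== Notes on version B (the rewrite author's own statement) =====
-- stated objective: alternative
-- what changed: Replaces the mutating hash-accumulate loop (conditional insert of an empty list then append) by a pure two-stage group-by: map each item to (dash-count, value), dedup the counts in first-occurrence order, then build each group independently with a filter comprehension.
import Mathlib
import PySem

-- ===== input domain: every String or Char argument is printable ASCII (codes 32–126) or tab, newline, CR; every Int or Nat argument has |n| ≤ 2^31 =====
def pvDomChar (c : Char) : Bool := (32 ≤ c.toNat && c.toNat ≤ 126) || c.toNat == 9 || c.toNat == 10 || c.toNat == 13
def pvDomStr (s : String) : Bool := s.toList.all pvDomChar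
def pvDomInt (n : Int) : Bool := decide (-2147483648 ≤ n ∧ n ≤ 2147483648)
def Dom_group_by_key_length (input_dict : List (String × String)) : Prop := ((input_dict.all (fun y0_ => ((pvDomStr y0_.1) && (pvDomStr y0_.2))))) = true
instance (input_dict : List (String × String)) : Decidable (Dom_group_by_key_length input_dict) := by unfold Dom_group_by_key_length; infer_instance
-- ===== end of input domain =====

-- B replaces A's mutating hash-accumulate loop by a pure map / dedup / per-group filter group-by (alternative decomposition, same results).

-- parts_count = key.count('-') + 1  (shared arithmetic helper of both ports)
def pvCnt (k : String) : Int := PySem.Str.count k "-" + 1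

-- ===== PORT A =====
-- grouped_dict = {}; for key, value: if parts_count not in grouped_dict: grouped_dict[parts_count] = [];
-- grouped_dict[parts_count].append(value)  (append on the stored list = modify with ++ [value]); return grouped_dict
def group_by_key_length (input_dict : List (String × String)) : List (Int × List String) :=
  (input_dict.foldl
    (fun d kv =>
      let parts_count := pvCnt kv.1
      let d1 := if d.contains parts_count then d else d.insert parts_count []
      d1.modify parts_count [] (fun l => l ++ [kv.2]))
    PySem.Dict.empty).items

-- ===== PORT B =====
def group_by_key_length_alt (input_dict : List (String × String)) : List (Int × List String) :=
  let pairs := input_dict.map (fun kv => (pvCnt kv.1, kv.2))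
  (PySem.List.dedup (pairs.map (fun p => p.1))).map
    (fun c => (c, (pairs.filter (fun p => p.1 == c)).map (fun p => p.2)))

-- ===== PRECONDITION & SPEC =====
def Spec_group_by_key_length (input_dict : List (String × String)) (out : List (Int × List String)) : Prop := out = group_by_key_length_alt input_dict
instance (input_dict : List (String × String)) (out : List (Int × List String)) : Decidable (Spec_group_by_key_length input_dict out) := by unfold Spec_group_by_key_length; infer_instance

-- ===== CLAIM (what is proved, stated in full; the proofs are below) =====
def Claim_equal_group_by_key_length : Prop := ∀ (input_dict : List (String × String)), Dom_group_by_key_length input_dict → Spec_group_by_key_length input_dict (group_by_key_length input_dict)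

-- ===== LEMMAS AND PROOFS =====

-- A's step (conditional empty insert, then append) is exactly a modify-with-default-[]
theorem pv_stepA_eq (d : PySem.Dict Int (List String)) (kv : String × String) :
    (let parts_count := pvCnt kv.1
     let d1 := if d.contains parts_count then d else d.insert parts_count []
     d1.modify parts_count [] (fun l => l ++ [kv.2]))
    = d.modify (pvCnt kv.1) [] (fun l => l ++ [kv.2]) := by
  by_cases h : d.contains (pvCnt kv.1)
  · simp [h]
  · simp only [h, if_false, Bool.false_eq_true]
    simp [PySem.Dict.modify, PySem.Dict.getD_insert_self, PySem.Dict.insert_insert_self,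
      PySem.Dict.getD_of_not_contains d [] (by simpa using h)]

-- ===== VERDICT (by name: the statement is the Claim_ definition above) =====
theorem group_by_key_length_spec : Claim_equal_group_by_key_length := by
  intro input_dict _
  unfold Spec_group_by_key_length group_by_key_length group_by_key_length_alt
  have hfold :
      input_dict.foldl
        (fun d kv =>
          let parts_count := pvCnt kv.1
          let d1 := if d.contains parts_count then d else d.insert parts_count []
          d1.modify parts_count [] (fun l => l ++ [kv.2]))
        PySem.Dict.empty
      = (input_dict.map (fun kv => (pvCnt kv.1, kv.2))).foldl
          (fun d p => d.modify p.1 [] (fun l => l ++ [p.2])) PySem.Dict.empty := by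
    rw [List.foldl_map]
    exact PySem.List.foldl_congr_mem _ _ _ _ (fun d kv _ => pv_stepA_eq d kv)
  rw [hfold]
  set pairs := input_dict.map (fun kv => (pvCnt kv.1, kv.2)) with hpairs
  set D := pairs.foldl (fun d p => d.modify p.1 [] (fun l => l ++ [p.2])) PySem.Dict.empty with hD
  have hnodup : D.keys.Nodup := by
    rw [hD]
    exact PySem.Dict.nodup_keys_foldl_modify_key pairs (fun p => p.1) [] (fun _ p l => l ++ [p.2])
      PySem.Dict.empty (by simp)
  have hkeys : D.keys = PySem.List.dedup (pairs.map (fun p => p.1)) := by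
    rw [hD]
    have := PySem.Dict.keys_foldl_modify_key pairs (fun p => p.1) []
      (fun _ p l => l ++ [p.2]) (PySem.Dict.empty (κ := Int) (ν := List String))
    simpa [PySem.Set.update, PySem.Set.ofList_eq_foldl] using this
  rw [PySem.Dict.items_eq_map_keys D hnodup [], hkeys]
  refine List.map_congr_left (fun c _ => ?_)
  have hgetD : D.getD c [] = (pairs.filter (fun p => p.1 == c)).map (fun p => p.2) := by
    rw [hD]
    simpa using PySem.Dict.getD_foldl_modify_append pairs PySem.Dict.empty c
  rw [hgetD]
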